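-- pv_equiv track=rewrite | github.com/abene86/HW_1-python | agebeyeh_h1.py | findCountEachNumberList
-- ===== SOURCE A (Python) =====
-- def findCountEachNumberList(list):
--     startIndex = 0
--     compareIndex= startIndex+1
--     count=0
--     numberWithCount={}
--     while(startIndex < len(list)):
--         if compareIndex == len(list):
--             count+=1
--             number=list[startIndex]
--             numberWithCount[number]=count
--             count=0
--             break
--
--         else:
--             if list[startIndex] == list[compareIndex]:
--                 count+=1
--                 compareIndex+=1
--             else:
--                 count+=1
--                 number=list[startIndex]
--                 numberWithCount[number]=count
--                 startIndex = compareIndex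
--                 compareIndex+=1
--                 count=0
--     return numberWithCount
-- ===== SOURCE B (Python) =====
-- def findCountEachNumberList(list):
--     # Two staged passes instead of a scanning counter: first mark every position where
--     # the value changes, then read each run's length off as the difference of adjacent
--     # boundaries; dict overwrite makes the last run of a repeated value win, as in A.
--     n = len(list)
--     if n == 0:
--         return {}
--     bounds = [0] + [i for i in range(1, n) if list[i] != list[i - 1]] + [n]
--     return {list[s]: e - s for s, e in zip(bounds, bounds[1:])}
-- ===== Notes on version B (the rewrite author's own statement) =====
-- stated objective: alternative
-- what changed: A scans with two indices keeping a running count and records a run at each boundary it detects; B has no counter at all: it first builds the list of change positions (a boundary pass over adjacent pairs), then builds the dict in a second pass by subtracting adjacent boundaries to get each run length, relying on dict overwrite so the last run of a repeated value wins.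
import Mathlib
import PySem

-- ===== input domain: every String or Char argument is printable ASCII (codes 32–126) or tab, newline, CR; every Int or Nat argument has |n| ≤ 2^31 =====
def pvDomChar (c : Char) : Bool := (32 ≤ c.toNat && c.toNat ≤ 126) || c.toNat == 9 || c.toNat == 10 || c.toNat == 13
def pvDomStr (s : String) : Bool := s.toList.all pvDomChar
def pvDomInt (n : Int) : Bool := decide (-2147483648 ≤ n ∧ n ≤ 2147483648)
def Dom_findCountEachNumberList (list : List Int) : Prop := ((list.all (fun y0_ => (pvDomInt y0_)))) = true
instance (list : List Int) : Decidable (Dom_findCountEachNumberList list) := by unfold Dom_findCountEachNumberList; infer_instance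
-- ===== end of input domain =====

-- B replaces A's counting scan by two staged passes: mark the change positions, then read
-- each run length off as the difference of adjacent boundaries (no running counter).

-- ===== PORT A =====
-- A's while loop, state (startIndex, compareIndex, count, numberWithCount).
-- Indices are Nats; list[i] is ported as getD (the loop only reads in-range indices:
-- startIndex < len is the guard, compareIndex < len holds in the else-branch).
-- The conjunct 'compareIndex ≤ l.length' is a totality guard only (invariantly true).
def pvALoop (l : List Int) (startIndex compareIndex : Nat) (count : Int)
    (numberWithCount : PySem.Dict Int Int) : PySem.Dict Int Int :=
  if h : startIndex < l.length ∧ compareIndex ≤ l.length then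
    if compareIndex = l.length then
      numberWithCount.insert (l.getD startIndex 0) (count + 1)
    else
      if l.getD startIndex 0 = l.getD compareIndex 0 then
        pvALoop l startIndex (compareIndex + 1) (count + 1) numberWithCount
      else
        pvALoop l compareIndex (compareIndex + 1) 0
          (numberWithCount.insert (l.getD startIndex 0) (count + 1))
  else numberWithCount
termination_by l.length - compareIndex
decreasing_by all_goals omega

def findCountEachNumberList (list : List Int) : List (Int × Int) :=
  (pvALoop list 0 1 0 PySem.Dict.empty).items

-- ===== PORT B =====
-- Source B line by line: n = len, the empty early return, the boundary list comprehension
-- over range(1, n) (list[i] read as getD: i and i-1 are in range), and the dict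
-- comprehension over zip(bounds, bounds[1:]) as a fold of inserts.
def findCountEachNumberList_alt (list : List Int) : List (Int × Int) :=
  let n : Int := (list.length : Int)
  if list.length = 0 then [] else
  let bounds : List Int :=
    0 :: ((PySem.List.pyRange 1 n 1).filter
      (fun i => decide (list.getD i.toNat 0 ≠ list.getD (i - 1).toNat 0)) ++ [n])
  ((bounds.zip (bounds.drop 1)).foldl
      (fun d (p : Int × Int) => d.insert (list.getD p.1.toNat 0) (p.2 - p.1))
      PySem.Dict.empty).items

-- ===== PRECONDITION & SPEC =====
def Spec_findCountEachNumberList (list : List Int) (out : List (Int × Int)) : Prop := out = findCountEachNumberList_alt list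
instance (list : List Int) (out : List (Int × Int)) : Decidable (Spec_findCountEachNumberList list out) := by unfold Spec_findCountEachNumberList; infer_instance

-- ===== CLAIM (what is proved, stated in full; the proofs are below) =====
def Claim_equal_findCountEachNumberList : Prop := ∀ (list : List Int), Dom_findCountEachNumberList list → Spec_findCountEachNumberList list (findCountEachNumberList list)

-- ===== LEMMAS AND PROOFS =====

-- Common reference point: the run-length decomposition of the input and the dict
-- obtained by inserting each (value, run length) pair in order.
def pvRLE : List Int → List (Int × Int)
  | [] => []
  | x :: xs =>
    (x, 1 + ((xs.takeWhile (fun y => y = x)).length : Int)) ::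
      pvRLE (xs.dropWhile (fun y => y = x))
termination_by l => l.length
decreasing_by
  simp only [List.length_cons]
  exact Nat.lt_succ_of_le (List.length_dropWhile_le _ _)

def pvIns (d : PySem.Dict Int Int) (ps : List (Int × Int)) : PySem.Dict Int Int :=
  ps.foldl (fun d p => d.insert p.1 p.2) d

-- A-side intermediate: the per-element running-counter fold A's loop amounts to.
def pvBStep (st : PySem.Dict Int Int × Option Int × Int) (x : Int) :
    PySem.Dict Int Int × Option Int × Int :=
  let run := if st.2.1 = some x then st.2.2 + 1 else 1
  (st.1.insert x run, some x, run)

-- A's loop from state (si, ci, c, d) equals the running-counter fold over l.drop ci.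
lemma pvALoop_eq_foldl (l : List Int) (si ci : Nat) (c : Int) (d : PySem.Dict Int Int)
    (h1 : si < l.length) (h2 : ci ≤ l.length) :
    pvALoop l si ci c d =
      ((l.drop ci).foldl pvBStep
        (d.insert (l.getD si 0) (c + 1), some (l.getD si 0), c + 1)).1 := by
  induction hn : l.length - ci using Nat.strong_induction_on generalizing si ci c d with
  | _ n ih =>
  rw [pvALoop]
  rcases Nat.eq_or_lt_of_le h2 with he | hlt
  · simp [he, h1, List.drop_length]
  · have hdrop : l.drop ci = l[ci] :: l.drop (ci + 1) := List.drop_eq_getElem_cons hlt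
    have hgetci : l.getD ci 0 = l[ci] := by simp [List.getD, hlt]
    simp only [h1, h2, and_self, dif_pos, if_neg (Nat.ne_of_lt hlt)]
    by_cases heq : l.getD si 0 = l.getD ci 0
    · rw [ih (l.length - (ci + 1)) (by omega) si (ci + 1) (c + 1) d h1 (by omega) rfl]
      rw [if_pos heq, hdrop]
      simp only [List.foldl_cons, pvBStep]
      rw [← hgetci, ← heq]
      simp [PySem.Dict.insert_insert_self]
    · rw [if_neg heq,
        ih (l.length - (ci + 1)) (by omega) ci (ci + 1) 0 (d.insert (l.getD si 0) (c + 1))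
          (by omega) (by omega) rfl]
      rw [hdrop]
      simp only [List.foldl_cons, pvBStep]
      rw [← hgetci]
      simp only [List.getD] at heq ⊢
      simp [heq]


-- The running-counter fold, started inside a run of x with partial count c already
-- written, is the insertion of the remaining (value, run length) pairs.
lemma foldl_pvBStep_rle (l : List Int) (d : PySem.Dict Int Int) (x : Int) (c : Int) :
    (List.foldl pvBStep (d.insert x c, some x, c) l).1 =
      pvIns d ((x, c + ((l.takeWhile (fun y => decide (y = x))).length : Int)) ::
        pvRLE (l.dropWhile (fun y => decide (y = x)))) := by
  induction l generalizing d x c with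
  | nil => simp [pvIns, pvRLE]
  | cons y ys ih =>
    by_cases hxy : y = x
    · subst hxy
      simp only [List.foldl_cons, pvBStep, if_true, PySem.Dict.insert_insert_self]
      rw [ih d y (c + 1)]
      simp only [List.takeWhile_cons, decide_true, List.dropWhile_cons, if_true]
      congr 2
      simp only [List.length_cons]
      push_cast
      ring_nf
    · simp only [List.foldl_cons, pvBStep]
      rw [if_neg (by simpa using fun h => hxy h.symm)]
      rw [ih (d.insert x c) y 1]
      simp only [List.takeWhile_cons, List.dropWhile_cons, decide_eq_true_eq,
        if_neg hxy, List.length_nil]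
      rw [pvRLE]
      simp [pvIns]

-- A equals insertion of the run-length pairs.
lemma a_eq_rle (l : List Int) :
    findCountEachNumberList l = (pvIns PySem.Dict.empty (pvRLE l)).items := by
  cases l with
  | nil =>
    unfold findCountEachNumberList
    rw [pvALoop]
    simp [pvIns, pvRLE]
  | cons x xs =>
    unfold findCountEachNumberList
    rw [pvALoop_eq_foldl (x :: xs) 0 1 0 PySem.Dict.empty (by simp) (by simp)]
    simp only [List.getD_cons_zero, List.drop_one, List.tail_cons, zero_add]
    rw [foldl_pvBStep_rle]
    rw [pvRLE]

-- ----- B side: the boundary construction, named for the proofs -----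
def pvCuts (l : List Int) : List Int :=
  (PySem.List.pyRange 1 (l.length : Int) 1).filter
    (fun i => decide (l.getD i.toNat 0 ≠ l.getD (i - 1).toNat 0))

def pvBounds (l : List Int) : List Int := 0 :: (pvCuts l ++ [(l.length : Int)])

def pvPairs (l : List Int) : List (Int × Int) := (pvBounds l).zip ((pvBounds l).drop 1)

def pvP (l : List Int) : List (Int × Int) :=
  (pvPairs l).map (fun p => (l.getD p.1.toNat 0, p.2 - p.1))

lemma pvBounds_nonneg (l : List Int) : ∀ a ∈ pvBounds l, 0 ≤ a := by
  intro a ha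
  simp only [pvBounds, pvCuts, List.mem_cons, List.mem_append,
    List.mem_filter] at ha
  rcases ha with h | ⟨hr, _⟩ | h
  · omega
  · have := (PySem.List.mem_pyRange_one).1 hr
    omega
  · rcases h with h | h
    · omega
    · exact absurd h (List.not_mem_nil)

lemma pyRange_shift (a b k : Int) :
    PySem.List.pyRange (a + k) (b + k) 1 = (PySem.List.pyRange a b 1).map (· + k) := by
  rw [PySem.List.pyRange_one, PySem.List.pyRange_one]
  have h : b + k - (a + k) = b - a := by ring
  rw [h, List.map_map]
  exact List.map_congr_left (fun j _ => by simp; ring_nf)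

-- The boundary pairs of a nonempty list are exactly its run-length pairs.
lemma pvP_eq_pvRLE (l : List Int) (hl : l ≠ []) : pvP l = pvRLE l := by
  induction hn : l.length using Nat.strong_induction_on generalizing l with
  | _ n ih =>
  rcases l with _ | ⟨x, xs⟩
  · exact absurd rfl hl
  subst hn
  -- split off the first run: x :: xs = replicate m x ++ r
  set tw := xs.takeWhile (fun y => decide (y = x)) with htw
  set r := xs.dropWhile (fun y => decide (y = x)) with hr
  have htw_rep : tw = List.replicate tw.length x :=
    List.eq_replicate_of_mem (fun b hb => by simpa using List.mem_takeWhile_imp hb)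
  have hsplit : x :: xs = List.replicate (tw.length + 1) x ++ r := by
    rw [List.replicate_succ, List.cons_append, ← htw_rep]
    simp [htw, hr]
  set m : Nat := tw.length + 1 with hm
  have hlen : (x :: xs).length = m + r.length := by
    rw [hsplit]; simp
  have hget_lo : ∀ i : Int, 0 ≤ i → i < (m : Int) →
      (x :: xs).getD i.toNat 0 = x := by
    intro i h0 hmi
    rw [hsplit, List.getD_append _ _ _ _ (by simp; omega)]
    exact List.getD_replicate x (by omega)
  have hget_hi : ∀ i : Int, 0 ≤ i →
      (x :: xs).getD (i + (m : Int)).toNat 0 = r.getD i.toNat 0 := by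
    intro i h0
    rw [hsplit, List.getD_append_right _ _ _ _ (by simp; omega)]
    congr 1
    simp; omega
  have hfilter_lo :
      (PySem.List.pyRange 1 (m : Int) 1).filter
        (fun i => decide ((x :: xs).getD i.toNat 0 ≠ (x :: xs).getD (i - 1).toNat 0)) = [] := by
    apply List.filter_eq_nil_iff.mpr
    intro i hi
    have hmem := (PySem.List.mem_pyRange_one).1 hi
    rw [hget_lo i (by omega) (by omega), hget_lo (i - 1) (by omega) (by omega)]
    simp
  rcases hre : r with _ | ⟨y, r'⟩
  · -- single run: bounds are [0, m]
    have hcuts : pvCuts (x :: xs) = [] := by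
      unfold pvCuts
      have : ((x :: xs).length : Int) = (m : Int) := by rw [hlen, hre]; simp
      rw [this]
      exact hfilter_lo
    have hlm : ((x :: xs).length : Int) = (m : Int) := by rw [hlen, hre]; simp
    have hrle : pvRLE (x :: xs) = [(x, 1 + (tw.length : Int))] := by
      rw [pvRLE, ← htw, ← hr, hre]
      simp [pvRLE]
    rw [hrle]
    unfold pvP pvPairs pvBounds
    rw [hcuts, hlm]
    have hval : ((m : Nat) : Int) - 0 = 1 + (tw.length : Int) := by
      rw [hm]; push_cast; ring
    simp [hval]
  · -- at least two runs
    have hyx : y ≠ x := by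
      have := List.head_dropWhile_not (fun z => decide (z = x)) (l := xs) (by rw [← hr, hre]; simp)
      simp only [← hr, hre, List.head_cons] at this
      simpa using this
    have hrne : r ≠ [] := by rw [hre]; simp
    have hrlen : 0 < r.length := by rw [hre]; simp
    have hln : ((x :: xs).length : Int) = (m : Int) + (r.length : Int) := by
      rw [hlen]; push_cast; ring
    -- the boundary list splits as first-run boundary m plus shifted boundaries of r
    have hcuts : pvCuts (x :: xs) = (m : Int) :: (pvCuts r).map (· + (m : Int)) := by
      unfold pvCuts
      rw [hln, PySem.List.pyRange_one_append 1 (m : Int) ((m : Int) + (r.length : Int))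
        (by omega) (by omega)]
      rw [List.filter_append, hfilter_lo, List.nil_append]
      rw [PySem.List.pyRange_one_cons (by omega)]
      have hshift : PySem.List.pyRange ((m : Int) + 1) ((m : Int) + (r.length : Int)) 1 =
          (PySem.List.pyRange 1 (r.length : Int) 1).map (· + (m : Int)) := by
        have := pyRange_shift 1 (r.length : Int) (m : Int)
        rw [show (1 : Int) + (m : Int) = (m : Int) + 1 by ring,
          show (r.length : Int) + (m : Int) = (m : Int) + (r.length : Int) by ring] at this
        exact this
      rw [List.filter_cons]
      have hpm : (x :: xs).getD ((m : Int)).toNat 0 = y := by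
        have := hget_hi 0 (by omega)
        rw [show (0 : Int) + (m : Int) = (m : Int) by ring] at this
        rw [this]
        simp [hre]
      have hpm1 : (x :: xs).getD ((m : Int) - 1).toNat 0 = x :=
        hget_lo ((m : Int) - 1) (by omega) (by omega)
      rw [hpm, hpm1]
      simp only [hyx, ne_eq, not_false_eq_true, decide_true, if_true]
      congr 1
      rw [hshift, List.filter_map]
      congr 1
      apply List.filter_congr
      intro i hi
      have hmem := (PySem.List.mem_pyRange_one).1 hi
      have h1 : (x :: xs).getD (i + (m : Int)).toNat 0 = r.getD i.toNat 0 :=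
        hget_hi i (by omega)
      have h2 : (x :: xs).getD (i + (m : Int) - 1).toNat 0 = r.getD (i - 1).toNat 0 := by
        have := hget_hi (i - 1) (by omega)
        rw [show (i - 1) + (m : Int) = i + (m : Int) - 1 by ring] at this
        exact this
      simp only [Function.comp]
      rw [h1, h2]
    -- boundaries, pairs, and labelled pairs of x::xs in terms of r
    have hbounds : pvBounds (x :: xs) =
        0 :: (m : Int) :: ((pvCuts r ++ [(r.length : Int)]).map (· + (m : Int))) := by
      unfold pvBounds
      rw [hcuts, hln]
      simp [List.map_append]
      ring_nf
    have hpairs : pvPairs (x :: xs) =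
        (0, (m : Int)) :: (pvPairs r).map (Prod.map (· + (m : Int)) (· + (m : Int))) := by
      have hzs : ((pvBounds r).map (· + (m : Int))).zip
            (((pvBounds r).map (· + (m : Int))).drop 1) =
          ((pvBounds r).zip ((pvBounds r).drop 1)).map
            (Prod.map (· + (m : Int)) (· + (m : Int))) := by
        rw [← List.map_drop, List.zip_map]
      have hbrne : (pvBounds r).map (· + (m : Int)) =
          ((0 : Int) + (m : Int)) :: (pvCuts r ++ [(r.length : Int)]).map (· + (m : Int)) := by
        unfold pvBounds; simp
      have hdrop1 : ((pvCuts r ++ [(r.length : Int)]).map (· + (m : Int))) =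
          ((pvBounds r).map (· + (m : Int))).drop 1 := by
        rw [hbrne, List.drop_succ_cons, List.drop_zero]
      have hb0 : (m : Int) :: (pvCuts r ++ [(r.length : Int)]).map (· + (m : Int)) =
          (pvBounds r).map (· + (m : Int)) := by
        rw [hbrne]; norm_num
      unfold pvPairs
      rw [hbounds, hb0, List.drop_succ_cons, List.drop_zero]
      rw [hbrne, List.zip_cons_cons, ← hbrne, hdrop1, hzs]
      norm_num
    have hP : pvP (x :: xs) = (x, (m : Int)) :: pvP r := by
      unfold pvP
      rw [hpairs, List.map_cons, List.map_map, List.cons_eq_cons]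
      refine ⟨by simp, ?_⟩
      apply List.map_congr_left
      rintro ⟨a, b⟩ hp
      have ha : 0 ≤ a := pvBounds_nonneg r a (List.of_mem_zip hp).1
      have h1 := hget_hi a ha
      simp only [Function.comp_apply, Prod.map_apply, Prod.mk.injEq]
      exact ⟨h1, by ring⟩
    rw [hP]
    rw [pvRLE]
    simp only [← htw, ← hr]
    congr 1
    · congr 1
      rw [hm]; push_cast; ring
    · rw [← hre] at *
      exact ih r.length (by omega) r hrne rfl

-- B equals insertion of the run-length pairs.
lemma b_eq_rle (l : List Int) :
    findCountEachNumberList_alt l = (pvIns PySem.Dict.empty (pvRLE l)).items := by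
  rcases l with _ | ⟨x, xs⟩
  · simp [findCountEachNumberList_alt, pvIns, pvRLE, PySem.Dict.empty]
  · rw [← pvP_eq_pvRLE (x :: xs) (by simp)]
    unfold findCountEachNumberList_alt pvP pvPairs pvBounds pvCuts pvIns
    simp only [List.length_cons, if_neg (Nat.succ_ne_zero _), List.foldl_map]

-- ===== VERDICT (by name: the statement is the Claim_ definition above) =====
theorem findCountEachNumberList_spec : Claim_equal_findCountEachNumberList := by
  intro l _
  unfold Spec_findCountEachNumberList
  rw [a_eq_rle, b_eq_rle]
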